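-- pv_equiv track=rewrite | github.com/rahepler2/Covenant | src/covenant/verify/checker.py | _is_observed_in
-- ===== SOURCE A (Python) =====
-- def _is_observed_in(declared: str, actual: set[str]) -> bool:
--     """Check if a declared effect path is observed in actual mutations.
--
--     'from.balance' is observed if 'from.balance' is in actual or if
--     'from' (a parent) is mutated.
--     """
--     if declared in actual:
--         return True
--
--     # Check if any actual mutation is within the declared scope
--     for a in actual:
--         if a.startswith(declared + "."):
--             return True
--         # Also check if the declared is a sub-path of an actual
--         if declared.startswith(a + "."):
--             return True
--
--     return False
-- ===== SOURCE B (Python) =====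
-- def _is_observed_in(declared: str, actual: set[str]) -> bool:
--     if declared in actual:
--         return True
--     # reverse check: some dot-boundary prefix of declared was itself mutated
--     for i, ch in enumerate(declared):
--         if ch == "." and declared[:i] in actual:
--             return True
--     # forward check: some mutation lies within declared's scope
--     return any(a.startswith(declared + ".") for a in actual)
-- ===== Notes on version B (the rewrite author's own statement) =====
-- stated objective: alternative
-- what changed: The single combined scan over actual is replaced by two differently-shaped passes: the reverse check (declared is a sub-path of a mutation) now enumerates the dot-boundary prefixes of declared and tests each for membership in actual, and only the forward within-scope check still scans actual.
import Mathlib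
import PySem

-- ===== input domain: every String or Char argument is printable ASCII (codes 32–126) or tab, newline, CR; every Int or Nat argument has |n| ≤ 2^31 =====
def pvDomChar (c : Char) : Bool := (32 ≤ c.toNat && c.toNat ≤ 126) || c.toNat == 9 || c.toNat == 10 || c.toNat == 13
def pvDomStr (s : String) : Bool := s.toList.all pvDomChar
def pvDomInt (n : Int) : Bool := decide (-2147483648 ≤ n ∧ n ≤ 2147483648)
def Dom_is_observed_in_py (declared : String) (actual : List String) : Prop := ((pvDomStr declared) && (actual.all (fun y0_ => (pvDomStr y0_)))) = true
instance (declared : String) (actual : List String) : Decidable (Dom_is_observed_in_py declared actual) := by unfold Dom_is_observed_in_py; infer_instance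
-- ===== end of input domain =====

-- B reorganises A's single combined scan: the reverse (sub-path) check enumerates the
-- dot-boundary prefixes of declared with membership lookups, and a separate final pass
-- over actual keeps only the forward within-scope check (objective: alternative).

-- ===== PORT A =====
def is_observed_in_py (declared : String) (actual : List String) : Bool :=
  if actual.contains declared then true
  else
    actual.any (fun a =>
      if PySem.Str.startswith a (declared ++ ".") then true
      else if PySem.Str.startswith declared (a ++ ".") then true
      else false)

-- ===== PORT B =====
def is_observed_in_py_alt (declared : String) (actual : List String) : Bool :=
  if actual.contains declared then true
  else if (PySem.List.enumerate declared.toList 0).any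
      (fun p => p.2 == '.' && actual.contains (PySem.Str.slice declared none (some p.1))) then true
  else actual.any (fun a => PySem.Str.startswith a (declared ++ "."))

-- ===== PRECONDITION & SPEC =====
def Spec_is_observed_in_py (declared : String) (actual : List String) (out : Bool) : Prop := out = is_observed_in_py_alt declared actual
instance (declared : String) (actual : List String) (out : Bool) : Decidable (Spec_is_observed_in_py declared actual out) := by unfold Spec_is_observed_in_py; infer_instance

-- ===== CLAIM (what is proved, stated in full; the proofs are below) =====
def Claim_equal_is_observed_in_py : Prop := ∀ (declared : String) (actual : List String), Dom_is_observed_in_py declared actual → Spec_is_observed_in_py declared actual (is_observed_in_py declared actual)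

-- ===== LEMMAS AND PROOFS =====

lemma slice_mem (declared : String) (k : Nat) (actual : List String) :
    (PySem.Str.slice declared none (some (k : Int)) ∈ actual) ↔
    (∃ a ∈ actual, a.toList = declared.toList.take k) := by
  constructor
  · intro h
    exact ⟨_, h, by simp [PySem.List.slice_to_natCast]⟩
  · rintro ⟨a, ha, hEq⟩
    have : PySem.Str.slice declared none (some (k : Int)) = a := by
      apply String.ext
      simp [PySem.List.slice_to_natCast, hEq]
    rwa [this]

lemma key (declared : String) (actual : List String) :
    (actual.any (fun a => PySem.Str.startswith declared (a ++ "."))) =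
    ((PySem.List.enumerate declared.toList 0).any
      (fun p => p.2 == '.' && actual.contains (PySem.Str.slice declared none (some p.1)))) := by
  rw [Bool.eq_iff_iff]
  simp only [List.any_eq_true, PySem.Str.startswith_eq, String.toList_append,
    PySem.Chars.startswith_iff, PySem.List.mem_enumerate_iff, Bool.and_eq_true, beq_iff_eq,
    List.contains_iff_mem]
  constructor
  · rintro ⟨a, ha, hpre⟩
    obtain ⟨t, ht⟩ := hpre
    have ht' : declared.toList = a.toList ++ '.' :: t := by rw [← ht]; simp
    refine ⟨((a.toList.length : Int), '.'), ⟨a.toList.length, ?_, ?_⟩, rfl, ?_⟩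
    · rw [ht']; simp
    · congr 1
      · omega
      · have h4 : declared.toList[a.toList.length]? = some '.' := by
          rw [ht']; simp
        rw [List.getElem?_eq_some_iff] at h4
        obtain ⟨_, h5⟩ := h4
        exact h5.symm
    · rw [slice_mem]
      exact ⟨a, ha, by rw [ht']; simp⟩
  · rintro ⟨p, ⟨k, hk, hp⟩, hdot, hmem⟩
    subst hp
    simp only [zero_add] at hdot hmem
    rw [slice_mem] at hmem
    obtain ⟨a, ha, hEq⟩ := hmem
    refine ⟨a, ha, declared.toList.drop (k+1), ?_⟩
    rw [hEq]
    have hstep : declared.toList.take k ++ ".".toList = declared.toList.take (k+1) := by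
      rw [List.take_add_one]
      simp [List.getElem?_eq_getElem hk, hdot]
    rw [hstep, List.take_append_drop]

-- ===== VERDICT (by name: the statement is the Claim_ definition above) =====
theorem is_observed_in_py_spec : Claim_equal_is_observed_in_py := by
  intro declared actual _
  unfold Spec_is_observed_in_py is_observed_in_py is_observed_in_py_alt
  rw [← key, Bool.eq_iff_iff]
  simp [List.any_eq_true]
  constructor
  · rintro (h | ⟨x, hx, h1 | h2⟩)
    exacts [Or.inl h, Or.inr (Or.inr ⟨x, hx, h1⟩), Or.inr (Or.inl ⟨x, hx, h2⟩)]
  · rintro (h | ⟨x, hx, h2⟩ | ⟨x, hx, h1⟩)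
    exacts [Or.inl h, Or.inr ⟨x, hx, Or.inr h2⟩, Or.inr ⟨x, hx, Or.inl h1⟩]
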